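-- pv_equiv track=rewrite | github.com/acmeism/RosettaCodeData | Task/Ramanujan-primes-twins/Python/ramanujan-primes-twins.py | initialise_prime_pi
-- ===== SOURCE A (Python) =====
-- def initialise_prime_pi(limit: int):
--     result = [1] * limit
--     result[0] = 0
--     result[1] = 0
--
--     for i in range(4, limit, 2):
--         result[i] = 0
--
--     p = 3
--     square = 9
--
--     while square < limit:
--         if result[p] != 0:
--             q = square
--
--             while q < limit:
--                 result[q] = 0
--                 q += p << 1
--
--         square += (p + 1) << 2
--         p += 2
--
--     for i in range(1, len(result)):
--         result[i] += result[i - 1]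
--
--     return result
-- ===== SOURCE B (Python) =====
-- def initialise_prime_pi(limit: int):
--     def is_prime(n):
--         if n < 2:
--             return False
--         d = 2
--         while d * d <= n:
--             if n % d == 0:
--                 return False
--             d += 1
--         return True
--
--     out = []
--     count = 0
--     for i in range(limit):
--         if is_prime(i):
--             count += 1
--         out.append(count)
--     return out
-- ===== Notes on version B (the rewrite author's own statement) =====
-- stated objective: alternative
-- what changed: A builds the prime-counting table by an odd-only sieve of Eratosthenes followed by a prefix-sum pass; B instead tests each index for primality directly by trial division up to its square root while keeping a running count, so no shared mark array and no prefix pass exist.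
import Mathlib
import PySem

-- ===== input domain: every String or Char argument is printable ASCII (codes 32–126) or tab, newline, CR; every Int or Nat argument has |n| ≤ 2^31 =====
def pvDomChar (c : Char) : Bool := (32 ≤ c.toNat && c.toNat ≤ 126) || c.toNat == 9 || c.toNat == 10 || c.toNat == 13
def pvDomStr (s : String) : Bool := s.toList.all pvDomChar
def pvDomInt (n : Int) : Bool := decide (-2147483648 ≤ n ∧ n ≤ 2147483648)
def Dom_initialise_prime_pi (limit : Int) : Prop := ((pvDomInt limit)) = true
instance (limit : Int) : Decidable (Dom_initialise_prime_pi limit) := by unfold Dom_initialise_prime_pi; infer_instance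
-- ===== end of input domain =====

-- B re-implements the table by per-index trial division with a running count instead of A's
-- odd sieve plus prefix-sum pass; same values on every limit ≥ 2 (A raises IndexError below that).

-- ===== PORT A =====
-- inner 'while q < limit: result[q] = 0; q += p << 1' (0 < p is a totality guard only; A always has p ≥ 3)
def markA (n p q : Nat) (r : List Int) : List Int :=
  if h : q < n ∧ 0 < p then markA n p (q + 2 * p) (r.set q 0) else r
  termination_by n - q
  decreasing_by omega

-- outer 'while square < limit' loop carrying (p, square)
def sieveA (n p square : Nat) (r : List Int) : List Int :=
  if h : square < n then
    sieveA n (p + 2) (square + (p + 1) * 4)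
      (if r.getD p 0 ≠ 0 then markA n p square r else r)
  else r
  termination_by n - square
  decreasing_by omega

-- final 'for i in range(1, len(result)): result[i] += result[i-1]'
def prefixA (r : List Int) (i : Nat) : List Int :=
  if h : i < r.length then
    prefixA (r.set i (r.getD i 0 + r.getD (i - 1) 0)) (i + 1)
  else r
  termination_by r.length - i
  decreasing_by simp only [List.length_set]; omega

def initialise_prime_pi (limit : Int) : List Int :=
  let n := limit.toNat
  let r1 := ((List.replicate n (1 : Int)).set 0 0).set 1 0
  let r2 := (PySem.List.pyRange 4 limit 2).foldl (fun r i => r.set i.toNat 0) r1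
  let r3 := sieveA n 3 9 r2
  prefixA r3 1

-- ===== PORT B =====
-- 'while d * d <= n: if n % d == 0: return False; d += 1' (0 < d is a totality guard; B starts at d = 2)
def isPrimeLoopB (n d : Nat) : Bool :=
  if h : d * d ≤ n ∧ 0 < d then
    (if n % d = 0 then false else isPrimeLoopB n (d + 1))
  else true
  termination_by n + 1 - d
  decreasing_by rcases h with ⟨h1, h2⟩; have := Nat.le_mul_of_pos_left d h2; omega

def isPrimeB (m : Int) : Bool := if m < 2 then false else isPrimeLoopB m.toNat 2

def initialise_prime_pi_alt (limit : Int) : List Int :=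
  ((PySem.List.pyRange 0 limit 1).foldl
    (fun (s : Int × List Int) i =>
      let c := if isPrimeB i then s.1 + 1 else s.1
      (c, s.2 ++ [c])) ((0 : Int), ([] : List Int))).2

-- ===== PRECONDITION & SPEC =====
-- Pre_ excludes exactly limit < 2, where A raises IndexError (result[0] = 0 / result[1] = 0 on a too-short list).
def Pre_initialise_prime_pi (limit : Int) : Prop := 2 ≤ limit
instance (limit : Int) : Decidable (Pre_initialise_prime_pi limit) := by
  unfold Pre_initialise_prime_pi; infer_instance
def pvWitness_initialise_prime_pi : Int := (10)

def Spec_initialise_prime_pi (limit : Int) (out : List Int) : Prop := out = initialise_prime_pi_alt limit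
instance (limit : Int) (out : List Int) : Decidable (Spec_initialise_prime_pi limit out) := by
  unfold Spec_initialise_prime_pi; infer_instance

-- ===== CLAIM (what is proved, stated in full; the proofs are below) =====
def Claim_equal_initialise_prime_pi : Prop := ∀ (limit : Int), Dom_initialise_prime_pi limit → Pre_initialise_prime_pi limit → Spec_initialise_prime_pi limit (initialise_prime_pi limit)

-- ===== LEMMAS AND PROOFS =====

-- the common target: π table as a map over range

noncomputable def ind (t : Nat) : Int := if Nat.Prime t then 1 else 0
noncomputable def target (n : Nat) : List Int :=
  (List.range n).map (fun j => ∑ t ∈ Finset.range (j + 1), ind t)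

lemma isPrimeLoopB_iff : ∀ (n d : Nat), 1 ≤ d →
    (isPrimeLoopB n d = true ↔ ∀ e, d ≤ e → e * e ≤ n → ¬ e ∣ n) := by
  intro n d
  fun_induction isPrimeLoopB n d with
  | case1 a hg hm =>
    intro _
    constructor
    · intro hf; simp at hf
    · intro hall
      exact ((hall a le_rfl hg.1 (Nat.dvd_of_mod_eq_zero hm))).elim
  | case2 a hg hm ih =>
    intro _
    rw [ih (by omega)]
    constructor
    · intro hall e he hee hdv
      rcases Nat.lt_or_ge a e with hlt | hge
      · exact hall e (by omega) hee hdv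
      · have heq : e = a := by omega
        subst heq
        exact hm (Nat.mod_eq_zero_of_dvd hdv)
    · intro hall e he hee hdv; exact hall e (by omega) hee hdv
  | case3 a hg =>
    intro hd
    simp only [true_iff]
    intro e he hee hdv
    have : a * a ≤ e * e := Nat.mul_le_mul he he
    exact hg ⟨le_trans this hee, by omega⟩

lemma isPrimeB_eq (t : Nat) : isPrimeB (t : Int) = decide (Nat.Prime t) := by
  unfold isPrimeB
  rcases Nat.lt_or_ge t 2 with h2 | h2
  · rw [if_pos (by exact_mod_cast h2)]
    have : ¬ Nat.Prime t := by
      intro hp; exact absurd hp.two_le (by omega)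
    simp [this]
  · rw [if_neg (by omega), Int.toNat_natCast]
    have hiff := isPrimeLoopB_iff t 2 (by omega)
    have hprime : (∀ e, 2 ≤ e → e * e ≤ t → ¬ e ∣ t) ↔ Nat.Prime t := by
      constructor
      · intro hall
        by_contra hnp
        have hmf := Nat.minFac_prime (by omega : t ≠ 1)
        have hsq : t.minFac * t.minFac ≤ t := by
          have := Nat.minFac_sq_le_self (by omega : 0 < t) hnp
          nlinarith [this]
        exact hall t.minFac hmf.two_le hsq (Nat.minFac_dvd t)
      · intro hp e he hee hdv
        rcases (Nat.Prime.eq_one_or_self_of_dvd hp e hdv) with h1 | hself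
        · omega
        · subst hself; nlinarith
    have hmain : isPrimeLoopB t 2 = true ↔ Nat.Prime t := hiff.trans hprime
    by_cases hp : Nat.Prime t
    · simp [hp, hmain.mpr hp]
    · simp only [hp, decide_false]
      exact Bool.eq_false_iff.mpr (fun h => hp (hmain.mp h))

lemma alt_fold (n : Nat) :
    (PySem.List.pyRange 0 (n : Int) 1).foldl
      (fun (s : Int × List Int) i =>
        let c := if isPrimeB i then s.1 + 1 else s.1
        (c, s.2 ++ [c])) ((0 : Int), ([] : List Int))
      = (∑ t ∈ Finset.range n, ind t, target n) := by
  induction n with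
  | zero => simp [PySem.List.pyRange_one_eq_nil, target]
  | succ m ih =>
    have hsplit : PySem.List.pyRange 0 ((m + 1 : Nat) : Int) 1
        = PySem.List.pyRange 0 (m : Int) 1 ++ [(m : Int)] := by
      have := PySem.List.pyRange_one_succ_right (a := 0) (b := (m : Int)) (by positivity)
      push_cast
      exact this
    rw [hsplit, List.foldl_append, ih]
    simp only [List.foldl_cons, List.foldl_nil, isPrimeB_eq]
    have hc : (if decide (Nat.Prime m) = true then (∑ t ∈ Finset.range m, ind t) + 1
        else ∑ t ∈ Finset.range m, ind t) = ∑ t ∈ Finset.range (m + 1), ind t := by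
      rw [Finset.sum_range_succ]
      by_cases hp : Nat.Prime m <;> simp [hp, ind]
    rw [Prod.mk.injEq]
    refine ⟨hc, ?_⟩
    rw [target, target, List.range_succ, List.map_append]
    simp only [List.map_cons, List.map_nil]
    rw [hc]

lemma alt_eq_target (n : Nat) : initialise_prime_pi_alt (n : Int) = target n := by
  unfold initialise_prime_pi_alt
  rw [alt_fold]

def Good (n : Nat) (P : Nat → Bool) (r : List Int) : Prop :=
  r.length = n ∧ ∀ j, j < n → r.getD j 0 = if P j then 0 else 1

lemma Good_congr {n : Nat} {P Q : Nat → Bool} {r : List Int}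
    (h : Good n P r) (hpq : ∀ j, j < n → P j = Q j) : Good n Q r :=
  ⟨h.1, fun j hj => by rw [h.2 j hj, hpq j hj]⟩

lemma getD_set (l : List Int) (a : Nat) (x : Int) (j : Nat) :
    (l.set a x).getD j 0 = if a = j ∧ a < l.length then x else l.getD j 0 := by
  rw [List.getD_eq_getElem?_getD, List.getD_eq_getElem?_getD, List.getElem?_set]
  split_ifs with h1 h2 h3 h4 <;> first | (simp_all; omega) | simp_all

lemma foldl_set0 (xs : List Int) : ∀ (r : List Int),
    ((xs.foldl (fun r i => r.set i.toNat 0) r).length = r.length) ∧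
      ∀ j, (xs.foldl (fun r i => r.set i.toNat 0) r).getD j 0 =
        if ∃ x ∈ xs, x.toNat = j then 0 else r.getD j 0 := by
  induction xs with
  | nil => intro r; simp
  | cons x t ih =>
    intro r
    simp only [List.foldl_cons]
    refine ⟨by rw [(ih _).1, List.length_set], fun j => ?_⟩
    rw [(ih _).2, getD_set]
    by_cases hx : x.toNat = j
    · subst hx
      by_cases hm : ∃ y ∈ t, y.toNat = x.toNat
      · simp [hm]
      · by_cases hl : x.toNat < r.length
        · simp [hm, hl]
        · have : r.getD x.toNat 0 = 0 := by
            rw [List.getD_eq_getElem?_getD, List.getElem?_eq_none (by omega)]; rfl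
          simp [hm, hl]
    · have h1 : (∃ y ∈ x :: t, y.toNat = j) ↔ (∃ y ∈ t, y.toNat = j) := by
        simp only [List.mem_cons]
        constructor
        · rintro ⟨y, (rfl | hy), hyj⟩
          · exact absurd hyj hx
          · exact ⟨y, hy, hyj⟩
        · rintro ⟨y, hy, hyj⟩; exact ⟨y, Or.inr hy, hyj⟩
      simp only [h1]
      split_ifs with h2 h3 <;> simp_all

abbrev M (n p j : Nat) : Prop :=
  j < 2 ∨ (2 ∣ j ∧ 4 ≤ j) ∨
    ∃ r ∈ List.range p, Nat.Prime r ∧ ¬ 2 ∣ r ∧ r * r < n ∧ r * r ≤ j ∧ (2 * r) ∣ (j - r * r)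

lemma markA_good (n p : Nat) (hp : 0 < p) : ∀ q r (P : Nat → Bool), Good n P r →
    Good n (fun j => P j || (decide (q ≤ j) && decide ((2 * p) ∣ (j - q)))) (markA n p q r) := by
  intro q0 r0
  fun_induction markA n p q0 r0 with
  | case1 q r h ih =>
    intro P hg
    have hset : Good n (fun j => P j || decide (j = q)) (r.set q 0) := by
      refine ⟨by rw [List.length_set]; exact hg.1, fun j hj => ?_⟩
      rw [getD_set]
      by_cases hjq : j = q
      · subst hjq; simp [hg.1, hj]
      · have hne : ¬ (q = j ∧ q < r.length) := fun hc => hjq hc.1.symm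
        simp only [if_neg hne, hg.2 j hj, hjq, decide_false, Bool.or_false]
    have hres := ih _ hset
    refine Good_congr hres (fun j hj => ?_)
    by_cases hP : P j = true
    · simp [hP]
    · simp only [Bool.not_eq_true] at hP
      simp only [hP, Bool.false_or]
      have hiff : (j = q ∨ (q + 2 * p ≤ j ∧ (2 * p) ∣ (j - (q + 2 * p)))) ↔
          (q ≤ j ∧ (2 * p) ∣ (j - q)) := by
        constructor
        · rintro (rfl | ⟨hle, ⟨k, hk⟩⟩)
          · exact ⟨le_rfl, by simp⟩
          · refine ⟨by omega, ⟨k + 1, ?_⟩⟩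
            have he : 2 * p * (k + 1) = 2 * p * k + 2 * p := by ring
            omega
        · rintro ⟨hle, ⟨k, hk⟩⟩
          rcases Nat.eq_zero_or_pos k with rfl | hk1
          · left; omega
          · right
            have h2 : 2 * p ≤ 2 * p * k := Nat.le_mul_of_pos_right _ hk1
            have hk2 : 2 * p * k = 2 * p * (k - 1) + 2 * p := by
              cases k with
              | zero => omega
              | succ m => simp only [Nat.add_sub_cancel]; ring
            exact ⟨by omega, ⟨k - 1, by omega⟩⟩
      simp only [← Bool.decide_and, ← Bool.decide_or, decide_eq_decide]
      exact hiff
  | case2 q r h =>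
    intro P hg
    refine Good_congr hg (fun j hj => ?_)
    have hq : ¬ q ≤ j := by omega
    simp [hq]

lemma mark_not_prime {j r : Nat} (hr : r.Prime) (hrr : ¬ 2 ∣ r)
    (hle : r * r ≤ j) (hdvd : (2 * r) ∣ (j - r * r)) : ¬ j.Prime := by
  intro hj
  have hrj : r ∣ j := by
    rcases hdvd with ⟨k, hk⟩
    have h1 : j = r * r + 2 * r * k := by omega
    exact ⟨r + 2 * k, by rw [h1]; ring⟩
  have h2 : 2 ≤ r := hr.two_le
  have hlt : r < j := by nlinarith
  rcases (hj.eq_one_or_self_of_dvd r hrj) with h1 | hself <;> omega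

lemma composite_mark {j : Nat} (hj2 : 2 ≤ j) (hodd : ¬ 2 ∣ j) (hnp : ¬ j.Prime) :
    ∃ r, r.Prime ∧ ¬ 2 ∣ r ∧ r * r ≤ j ∧ (2 * r) ∣ (j - r * r) := by
  set r := j.minFac with hrdef
  have hr : r.Prime := Nat.minFac_prime (by omega)
  have hrj : r ∣ j := Nat.minFac_dvd j
  have hro : ¬ 2 ∣ r := by
    intro h2r
    have : r = 2 := ((Nat.prime_dvd_prime_iff_eq Nat.prime_two hr).mp h2r).symm
    exact hodd (this ▸ hrj)
  have hsq : r * r ≤ j := by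
    have := Nat.minFac_sq_le_self (by omega : 0 < j) hnp
    nlinarith
  refine ⟨r, hr, hro, hsq, ?_⟩
  obtain ⟨m, hm⟩ := hrj
  have hrm : r ≤ m := by nlinarith [hr.two_le]
  have hmo : ¬ 2 ∣ m := by
    rintro ⟨t, ht⟩
    exact hodd ⟨r * t, by rw [hm, ht]; ring⟩
  have heven : 2 ∣ (m - r) := by omega
  obtain ⟨k, hk⟩ := heven
  exact ⟨k, by rw [hm]; have : r * m = r * r + r * (m - r) := by rw [Nat.mul_sub]; omega
               rw [this]; rw [hk]; ring_nf; omega⟩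

lemma notM_top_iff_prime {n j : Nat} (hj : j < n) : ¬ M n n j ↔ Nat.Prime j := by
  constructor
  · intro hnm
    by_contra hnp
    apply hnm
    unfold M
    rcases Nat.lt_or_ge j 2 with h2 | h2
    · exact Or.inl h2
    by_cases he : 2 ∣ j
    · refine Or.inr (Or.inl ⟨he, ?_⟩)
      rcases Nat.lt_or_ge j 4 with h4 | h4
      · interval_cases j <;> simp_all [Nat.prime_two, Nat.prime_three]
      · exact h4
    · obtain ⟨r, hr, hro, hsq, hdv⟩ := composite_mark h2 he hnp
      have hrn : r < n := by nlinarith [hr.two_le]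
      exact Or.inr (Or.inr ⟨r, List.mem_range.mpr hrn, hr, hro, by omega, hsq, hdv⟩)
  · intro hp hm
    unfold M at hm
    rcases hm with h2 | ⟨he, h4⟩ | ⟨r, _, hr, hro, _, hsq, hdv⟩
    · exact absurd hp.two_le (by omega)
    · rcases (hp.eq_one_or_self_of_dvd 2 he) with h | h <;> omega
    · exact mark_not_prime hr hro hsq hdv hp

lemma notM_self_iff_prime {n p : Nat} (h3 : 3 ≤ p) (hodd : ¬ 2 ∣ p) (hlt : p * p < n) :
    ¬ M n p p ↔ Nat.Prime p := by
  constructor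
  · intro hnm
    by_contra hnp
    apply hnm
    obtain ⟨r, hr, hro, hsq, hdv⟩ := composite_mark (by omega) hodd hnp
    have hrp : r < p := by nlinarith [hr.two_le]
    exact Or.inr (Or.inr ⟨r, List.mem_range.mpr hrp, hr, hro, by nlinarith, hsq, hdv⟩)
  · intro hp hm
    rcases hm with h2 | ⟨he, h4⟩ | ⟨r, _, hr, hro, _, hsq, hdv⟩
    · omega
    · exact hodd he
    · exact mark_not_prime hr hro hsq hdv hp

lemma M_mono_iff {n p j : Nat} (hpn : n ≤ p * p) : M n p j ↔ M n n j := by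
  unfold M
  refine or_congr Iff.rfl (or_congr Iff.rfl ⟨?_, ?_⟩)
  · rintro ⟨r, _, hr, hro, hrn, hsq, hdv⟩
    have : r < n := by nlinarith [hr.two_le]
    exact ⟨r, List.mem_range.mpr this, hr, hro, hrn, hsq, hdv⟩
  · rintro ⟨r, _, hr, hro, hrn, hsq, hdv⟩
    have : r < p := by nlinarith [hr.two_le]
    exact ⟨r, List.mem_range.mpr this, hr, hro, hrn, hsq, hdv⟩

lemma M_step {n p j : Nat} (h3 : 3 ≤ p) (hodd : ¬ 2 ∣ p) (hlt : p * p < n) :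
    M n (p + 2) j ↔
      (M n p j ∨ (Nat.Prime p ∧ p * p ≤ j ∧ (2 * p) ∣ (j - p * p))) := by
  unfold M
  constructor
  · rintro (h2 | h4 | ⟨r, hmem, hr, hro, hrn, hsq, hdv⟩)
    · exact Or.inl (Or.inl h2)
    · exact Or.inl (Or.inr (Or.inl h4))
    · have hrp2 : r < p + 2 := List.mem_range.mp hmem
      rcases Nat.lt_or_ge r p with hrp | hrp
      · exact Or.inl (Or.inr (Or.inr ⟨r, List.mem_range.mpr hrp, hr, hro, hrn, hsq, hdv⟩))
      · have : r = p := by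
          rcases Nat.eq_or_lt_of_le hrp with h | h
          · omega
          · exfalso; exact hro (by omega)
        subst this
        exact Or.inr ⟨hr, hsq, hdv⟩
  · rintro (h | ⟨hp, hsq, hdv⟩)
    · rcases h with h2 | h4 | ⟨r, hmem, hr, hro, hrn, hsq, hdv⟩
      · exact Or.inl h2
      · exact Or.inr (Or.inl h4)
      · exact Or.inr (Or.inr ⟨r, List.mem_range.mpr (by have := List.mem_range.mp hmem; omega), hr, hro, hrn, hsq, hdv⟩)
    · exact Or.inr (Or.inr ⟨p, List.mem_range.mpr (by omega), hp, hodd, hlt, hsq, hdv⟩)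

lemma sieveA_good (n : Nat) : ∀ m p r, n - p * p ≤ m → 3 ≤ p → ¬ 2 ∣ p →
    Good n (fun j => decide (M n p j)) r →
    Good n (fun j => decide (M n n j)) (sieveA n p (p * p) r) := by
  intro m
  induction m with
  | zero =>
    intro p r hm h3 hodd hg
    rw [sieveA, dif_neg (by omega)]
    exact Good_congr hg (fun j hj => by
      simp only [decide_eq_decide]; exact M_mono_iff (by omega))
  | succ m ih =>
    intro p r hm h3 hodd hg
    rcases Nat.lt_or_ge (p * p) n with hlt | hge
    · rw [sieveA, dif_pos hlt]
      have hpn : p < n := by nlinarith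
      have hread : r.getD p 0 ≠ 0 ↔ ¬ M n p p := by
        rw [hg.2 p hpn]
        by_cases hM : M n p p <;> simp [hM]
      have hstep : Good n (fun j => decide (M n (p + 2) j))
          (if r.getD p 0 ≠ 0 then markA n p (p * p) r else r) := by
        by_cases hc : r.getD p 0 ≠ 0
        · rw [if_pos hc]
          have hprime : Nat.Prime p := (notM_self_iff_prime h3 hodd hlt).mp (hread.mp hc)
          have := markA_good n p (by omega) (p * p) r _ hg
          refine Good_congr this (fun j hj => ?_)
          simp only [← Bool.decide_and, ← Bool.decide_or, decide_eq_decide]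
          rw [M_step h3 hodd hlt]
          constructor
          · rintro (h | ⟨h1, h2⟩)
            · exact Or.inl h
            · exact Or.inr ⟨hprime, h1, h2⟩
          · rintro (h | ⟨_, h1, h2⟩)
            · exact Or.inl h
            · exact Or.inr ⟨h1, h2⟩
        · rw [if_neg hc]
          have hnprime : ¬ Nat.Prime p := fun hp =>
            hc (hread.mpr ((notM_self_iff_prime h3 hodd hlt).mpr hp))
          refine Good_congr hg (fun j hj => ?_)
          simp only [decide_eq_decide]
          rw [M_step h3 hodd hlt]
          exact ⟨Or.inl, fun h => h.elim id (fun ⟨hp, _⟩ => absurd hp hnprime)⟩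
      have heq : p * p + (p + 1) * 4 = (p + 2) * (p + 2) := by ring
      rw [heq]
      have hx : (p + 2) * (p + 2) = p * p + 4 * p + 4 := by ring
      exact ih (p + 2) _ (by omega) (by omega) (by omega) hstep
    · rw [sieveA, dif_neg (by omega)]
      exact Good_congr hg (fun j hj => by
        simp only [decide_eq_decide]; exact M_mono_iff hge)

lemma prefixA_spec (n : Nat) (f : Nat → Int) : ∀ m i r, n - i ≤ m → r.length = n → 1 ≤ i →
    (∀ j, j < n → r.getD j 0 = if j < i then (∑ t ∈ Finset.range (j + 1), f t) else f j) →
    (prefixA r i).length = n ∧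
      ∀ j, j < n → (prefixA r i).getD j 0 = ∑ t ∈ Finset.range (j + 1), f t := by
  intro m
  induction m with
  | zero =>
    intro i r hm hl hi hinv
    rw [prefixA, dif_neg (by omega)]
    exact ⟨hl, fun j hj => by rw [hinv j hj, if_pos (by omega)]⟩
  | succ m ih =>
    intro i r hm hl hi hinv
    rcases Nat.lt_or_ge i n with hlt | hge
    · rw [prefixA, dif_pos (by omega)]
      have hlen' : (r.set i (r.getD i 0 + r.getD (i - 1) 0)).length = n := by
        rw [List.length_set]; exact hl
      refine ih (i + 1) _ (by omega) hlen' (by omega) ?_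
      intro j hj
      rw [getD_set]
      by_cases hji : j = i
      · subst hji
        rw [if_pos ⟨rfl, by omega⟩, if_pos (by omega)]
        rw [hinv j hj, if_neg (by omega)]
        rw [hinv (j - 1) (by omega), if_pos (by omega)]
        have h1 : j - 1 + 1 = j := by omega
        rw [h1, Finset.sum_range_succ]
        ring
      · rw [if_neg (fun hc => hji hc.1.symm), hinv j hj]
        by_cases hlt2 : j < i
        · rw [if_pos hlt2, if_pos (by omega)]
        · rw [if_neg hlt2, if_neg (by omega)]
    · rw [prefixA, dif_neg (by omega)]
      exact ⟨hl, fun j hj => by rw [hinv j hj, if_pos (by omega)]⟩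

lemma M3_iff (n j : Nat) : M n 3 j ↔ (j < 2 ∨ (2 ∣ j ∧ 4 ≤ j)) := by
  unfold M
  constructor
  · rintro (h | h | ⟨r, hmem, hr, hro, -, -, -⟩)
    · exact Or.inl h
    · exact Or.inr h
    · have : r < 3 := List.mem_range.mp hmem
      interval_cases r
      · exact absurd hr (by decide)
      · exact absurd hr (by decide)
      · exact absurd (by decide : 2 ∣ 2) hro
  · rintro (h | h)
    · exact Or.inl h
    · exact Or.inr (Or.inl h)

lemma a_eq_target (n : Nat) (hn : 2 ≤ n) : initialise_prime_pi (n : Int) = target n := by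
  unfold initialise_prime_pi
  simp only [Int.toNat_natCast]
  have hg1 : Good n (fun j => decide (j < 2))
      (((List.replicate n (1 : Int)).set 0 0).set 1 0) := by
    refine ⟨by simp, fun j hj => ?_⟩
    rw [getD_set, getD_set]
    simp only [List.length_set, List.length_replicate]
    by_cases h1 : j = 1
    · subst h1; simp; omega
    · by_cases h0 : j = 0
      · subst h0; simp; omega
      · rw [if_neg (by omega), if_neg (by omega)]
        rw [List.getD_eq_getElem?_getD, List.getElem?_replicate]
        rw [if_pos hj]
        simp only [Option.getD_some]
        have h2 : ¬ j < 2 := by omega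
        simp [h2]
  have hmem : ∀ j : Nat, (∃ x ∈ PySem.List.pyRange 4 (n : Int) 2, x.toNat = j) ↔
      (4 ≤ j ∧ j < n ∧ 2 ∣ j) := by
    intro j
    constructor
    · rintro ⟨x, hx, rfl⟩
      rw [PySem.List.mem_pyRange_iff_of_pos (by norm_num)] at hx
      obtain ⟨h1, h2, h3⟩ := hx
      omega
    · rintro ⟨h1, h2, h3⟩
      refine ⟨(j : Int), ?_, Int.toNat_natCast j⟩
      rw [PySem.List.mem_pyRange_iff_of_pos (by norm_num)]
      obtain ⟨k, hk⟩ := h3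
      refine ⟨by omega, by omega, ⟨(k : Int) - 2, by omega⟩⟩
  have hg2 : Good n (fun j => decide (M n 3 j))
      ((PySem.List.pyRange 4 (n : Int) 2).foldl (fun r i => r.set i.toNat 0)
        (((List.replicate n (1 : Int)).set 0 0).set 1 0)) := by
    obtain ⟨hlen, hval⟩ := foldl_set0 (PySem.List.pyRange 4 (n : Int) 2)
      (((List.replicate n (1 : Int)).set 0 0).set 1 0)
    refine ⟨by rw [hlen]; exact hg1.1, fun j hj => ?_⟩
    rw [hval j, hg1.2 j hj]
    have hM : M n 3 j ↔ (j < 2 ∨ (2 ∣ j ∧ 4 ≤ j)) := M3_iff n j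
    by_cases hm : ∃ x ∈ PySem.List.pyRange 4 (n : Int) 2, x.toNat = j
    · have hj4 := (hmem j).mp hm
      simp [hm, hM, hj4.2.2, hj4.1]
    · have hno : ¬ (4 ≤ j ∧ j < n ∧ 2 ∣ j) := fun hc => hm ((hmem j).mpr hc)
      by_cases h2 : j < 2
      · simp [hm, h2, hM]
      · have hn2 : ¬ (j < 2 ∨ (2 ∣ j ∧ 4 ≤ j)) := by
          rintro (hc | ⟨he, h4⟩)
          · omega
          · exact hno ⟨h4, hj, he⟩
        simp [hm, h2, hM]
        intro he
        by_contra h4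
        exact hn2 (Or.inr ⟨he, by omega⟩)
  have key : ∀ r2 : List Int, Good n (fun j => decide (M n 3 j)) r2 →
      prefixA (sieveA n 3 9 r2) 1 = target n := by
    intro r2 hgr
    have hg3 : Good n (fun j => decide (M n n j)) (sieveA n 3 9 r2) := by
      have h9 : (9 : Nat) = 3 * 3 := by norm_num
      rw [h9]
      exact sieveA_good n n 3 r2 (by omega) (by omega) (by decide) hgr
    have hind : ∀ j, j < n → (sieveA n 3 9 r2).getD j 0 = ind j := by
      intro j hj
      rw [hg3.2 j hj, ind]
      by_cases hp : Nat.Prime j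
      · rw [if_pos hp, if_neg (by simp only [decide_eq_true_eq]; exact (notM_top_iff_prime hj).mpr hp)]
      · rw [if_neg hp, if_pos (by simp only [decide_eq_true_eq]; by_contra hc; exact hp ((notM_top_iff_prime hj).mp hc))]
    obtain ⟨hplen, hpval⟩ := prefixA_spec n ind n 1 _ (by omega) hg3.1 le_rfl (by
      intro j hj
      rw [hind j hj]
      by_cases h0 : j < 1
      · rw [if_pos h0]
        have : j = 0 := by omega
        subst this
        rw [Finset.sum_range_one]
      · rw [if_neg h0])
    apply List.ext_getElem
    · rw [hplen]; simp [target]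
    · intro i h1 h2
      have hi : i < n := by rw [← hplen]; exact h1
      have hv := hpval i hi
      rw [List.getD_eq_getElem?_getD, List.getElem?_eq_getElem h1, Option.getD_some] at hv
      rw [hv]
      simp [target]
  exact key _ hg2

-- ===== VERDICT (by name: the statement is the Claim_ definition above) =====
theorem initialise_prime_pi_spec : Claim_equal_initialise_prime_pi := by
  intro limit _ hpre
  unfold Spec_initialise_prime_pi
  have h2 : (2 : Int) ≤ limit := hpre
  have hn : limit = ((limit.toNat : Nat) : Int) := by omega
  rw [hn, a_eq_target limit.toNat (by omega), alt_eq_target]
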